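-- pv_equiv track=rewrite | github.com/alexandraback/datacollection | solutions_5658571765186560_1/Python/gugugu/omino.py | _solve
-- ===== SOURCE A (Python) =====
-- def _solve(X, R, C):
--     res = True
--     res = res and ((R*C) % X == 0)
--     for i in range(1, X):
--         j = (1 + X - i)
--         res = res and (min(i,j) <= min(R, C)) and (max(i,j) <= max(R, C))
--         res = res and not(min(i,j) == min(R,C) and X>3)
--     res = res and (X<7)
--     return res
-- ===== SOURCE B (Python) =====
-- def _solve(X, R, C):
--     # Closed-form: min(i, X+1-i) over i=1..X-1 covers exactly 1..(X+1)//2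
--     # and max(i, X+1-i) peaks at X, so the loop collapses to O(1) bounds.
--     m, M = min(R, C), max(R, C)
--     ok = (R * C) % X == 0 and X < 7
--     if X >= 2:
--         h = (X + 1) // 2
--         ok = ok and X <= M and (h < m if X > 3 else h <= m)
--     return ok
-- ===== Notes on version B (the rewrite author's own statement) =====
-- stated objective: simpler
-- what changed: Replaced the loop over i=1..X-1 (which ANDs per-i min/max bound checks) with closed-form O(1) bounds: X <= max(R,C) and (X+1)//2 <= min(R,C) (strictly < when X > 3), since min(i,X+1-i) ranges over 1..(X+1)//2 and max(i,X+1-i) peaks at X.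
import Mathlib
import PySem

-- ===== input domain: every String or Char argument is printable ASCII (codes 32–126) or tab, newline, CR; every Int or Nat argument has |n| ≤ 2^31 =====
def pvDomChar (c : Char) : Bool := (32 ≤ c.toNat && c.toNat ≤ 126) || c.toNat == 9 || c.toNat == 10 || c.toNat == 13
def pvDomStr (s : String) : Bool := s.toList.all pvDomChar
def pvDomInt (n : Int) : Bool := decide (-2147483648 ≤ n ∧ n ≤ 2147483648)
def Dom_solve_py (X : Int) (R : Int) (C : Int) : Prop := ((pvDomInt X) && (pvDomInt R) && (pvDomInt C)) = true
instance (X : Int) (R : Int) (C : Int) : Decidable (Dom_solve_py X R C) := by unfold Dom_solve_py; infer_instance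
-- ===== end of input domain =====

-- B replaces A's loop over i=1..X-1 with closed-form bounds using (X+1)//2 (simpler, O(1) instead of O(X)).

-- ===== PORT A =====
def solve_py (X : Int) (R : Int) (C : Int) : Bool :=
  let res := true
  let res := res && (PySem.Int.mod (R*C) X == 0)
  let res := (PySem.List.pyRange 1 X 1).foldl (fun res i =>
    let j := 1 + X - i
    let res := res && decide (min i j ≤ min R C) && decide (max i j ≤ max R C)
    let res := res && !(decide (min i j = min R C) && decide (X > 3))
    res) res
  res && decide (X < 7)

-- ===== PORT B =====
def solve_py_alt (X : Int) (R : Int) (C : Int) : Bool :=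
  let m := min R C
  let M := max R C
  let ok := (PySem.Int.mod (R*C) X == 0) && decide (X < 7)
  if X ≥ 2 then
    let h := PySem.Int.floordiv (X+1) 2
    ok && decide (X ≤ M) && (if X > 3 then decide (h < m) else decide (h ≤ m))
  else ok

-- ===== PRECONDITION & SPEC =====
-- Pre_ excludes only X = 0, where Python's (R*C) % X raises ZeroDivisionError.
def Pre_solve_py (X : Int) (R : Int) (C : Int) : Prop := X ≠ 0
instance (X : Int) (R : Int) (C : Int) : Decidable (Pre_solve_py X R C) := by unfold Pre_solve_py; infer_instance
def pvWitness_solve_py : Int × Int × Int := (4, 3, 4)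

def Spec_solve_py (X : Int) (R : Int) (C : Int) (out : Bool) : Prop := out = solve_py_alt X R C
instance (X : Int) (R : Int) (C : Int) (out : Bool) : Decidable (Spec_solve_py X R C out) := by unfold Spec_solve_py; infer_instance

-- ===== CLAIM =====
def Claim_equal_solve_py : Prop := ∀ (X : Int) (R : Int) (C : Int), Dom_solve_py X R C → Pre_solve_py X R C → Spec_solve_py X R C (solve_py X R C)

-- ===== LEMMAS AND PROOFS =====

theorem pv_foldl_and (f : Int → Bool) (l : List Int) (r : Bool) :
    l.foldl (fun r i => r && f i) r = (r && l.all f) := by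
  induction l generalizing r with
  | nil => simp
  | cons x l ih => rw [List.foldl_cons, ih, List.all_cons, Bool.and_assoc]

theorem pv_fold_eq (X R C : Int) (r : Bool) :
    (PySem.List.pyRange 1 X 1).foldl (fun res i =>
      res && decide (min i (1+X-i) ≤ min R C) && decide (max i (1+X-i) ≤ max R C)
        && !(decide (min i (1+X-i) = min R C) && decide (X > 3))) r
    = (r && (PySem.List.pyRange 1 X 1).all (fun i =>
        (decide (min i (1+X-i) ≤ min R C) && decide (max i (1+X-i) ≤ max R C))
        && !(decide (min i (1+X-i) = min R C) && decide (X > 3)))) := by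
  rw [show (fun (res : Bool) (i : Int) =>
      res && decide (min i (1+X-i) ≤ min R C) && decide (max i (1+X-i) ≤ max R C)
        && !(decide (min i (1+X-i) = min R C) && decide (X > 3)))
    = fun res i => res && ((decide (min i (1+X-i) ≤ min R C) && decide (max i (1+X-i) ≤ max R C))
        && !(decide (min i (1+X-i) = min R C) && decide (X > 3))) from by
      funext res i; simp [Bool.and_assoc]]
  exact pv_foldl_and _ _ r

-- The closed form of the loop's conjunction, for X ≥ 2.
theorem pv_all_closed (X R C : Int) (hX : 2 ≤ X) :
    (PySem.List.pyRange 1 X 1).all (fun i =>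
        (decide (min i (1+X-i) ≤ min R C) && decide (max i (1+X-i) ≤ max R C))
        && !(decide (min i (1+X-i) = min R C) && decide (X > 3)))
    = (decide (X ≤ max R C) &&
       (if X > 3 then decide (PySem.Int.floordiv (X+1) 2 < min R C)
        else decide (PySem.Int.floordiv (X+1) 2 ≤ min R C))) := by
  have hfd : PySem.Int.floordiv (X+1) 2 = (X+1) / 2 :=
    PySem.Int.floordiv_eq_ediv_of_pos (by omega)
  rw [Bool.eq_iff_iff]
  simp only [List.all_eq_true, PySem.List.mem_pyRange_one, Bool.and_eq_true, Bool.not_eq_true',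
    Bool.and_eq_false_iff, decide_eq_true_eq, decide_eq_false_iff_not, hfd]
  constructor
  · intro H
    have h1 := H 1 ⟨le_refl 1, by omega⟩
    have h2 := H ((X+1)/2) ⟨by omega, by omega⟩
    split_ifs with h3
    · simp only [decide_eq_true_eq]
      constructor
      · omega
      · rcases h2 with ⟨⟨hm, _⟩, hne⟩
        rcases hne with hne | hne
        · omega
        · omega
    · simp only [decide_eq_true_eq]
      rcases h2 with ⟨⟨hm, _⟩, _⟩
      constructor
      · omega
      · omega
  · intro H i hi
    split_ifs at H with h3 <;>
      simp only [decide_eq_true_eq] at H <;>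
      rcases H with ⟨hM, hm⟩
    · exact ⟨⟨by omega, by omega⟩, Or.inl (by omega)⟩
    · exact ⟨⟨by omega, by omega⟩, Or.inr (by omega)⟩

-- ===== VERDICT =====
theorem solve_py_spec : Claim_equal_solve_py := by
  intro X R C _ _
  unfold Spec_solve_py solve_py solve_py_alt
  simp only [Bool.true_and]
  rw [pv_fold_eq]
  by_cases hX : 2 ≤ X
  · rw [pv_all_closed X R C hX, if_pos (by omega : X ≥ 2)]
    cases PySem.Int.mod (R*C) X == 0 <;>
      cases hd : decide (X < 7) <;>
      cases hM : decide (X ≤ max R C) <;> simp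
  · rw [PySem.List.pyRange_one_eq_nil (by omega), if_neg (by omega)]
    simp
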